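-- pv_equiv track=rewrite | github.com/nfdi4cat/voc4cat-tool | src/voc4cat/util.py | _node_levels
-- ===== SOURCE A (Python) =====
-- def _node_levels(sl, root_node, level=0, sep="  ", out=None):
--     if out is None:
--         out = []
--     successors = sl.pop(root_node)
--     out.append((root_node, level))
--     for sn in successors:
--         if sn in sl:
--
--             _node_levels(sl, sn, level=level + 1, sep=sep, out=out)
--         else:
--             out.append((sn, level + 1))
--     return out
-- ===== SOURCE B (Python) =====
-- # B: iterative pre-order DFS with an explicit stack instead of recursion.
-- # Note: like A, it mutates sl (pops visited nodes) and appends to out in place.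
-- def _node_levels(sl, root_node, level=0, sep="  ", out=None):
--     if out is None:
--         out = []
--     successors = sl.pop(root_node)
--     out.append((root_node, level))
--     stack = [(sn, level + 1) for sn in reversed(successors)]
--     while stack:
--         node, lvl = stack.pop()
--         if node in sl:
--             children = sl.pop(node)
--             out.append((node, lvl))
--             stack.extend((sn, lvl + 1) for sn in reversed(children))
--         else:
--             out.append((node, lvl))
--     return out
-- ===== Notes on version B (the rewrite author's own statement) =====
-- stated objective: alternative
-- what changed: The recursive DFS (function calls itself for each expandable successor) is replaced by an iterative pre-order DFS over an explicit stack: successors are pushed in reversed order and the in-sl leaf test moves to pop time; same visit order, same sl pops, same cost.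
import Mathlib
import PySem

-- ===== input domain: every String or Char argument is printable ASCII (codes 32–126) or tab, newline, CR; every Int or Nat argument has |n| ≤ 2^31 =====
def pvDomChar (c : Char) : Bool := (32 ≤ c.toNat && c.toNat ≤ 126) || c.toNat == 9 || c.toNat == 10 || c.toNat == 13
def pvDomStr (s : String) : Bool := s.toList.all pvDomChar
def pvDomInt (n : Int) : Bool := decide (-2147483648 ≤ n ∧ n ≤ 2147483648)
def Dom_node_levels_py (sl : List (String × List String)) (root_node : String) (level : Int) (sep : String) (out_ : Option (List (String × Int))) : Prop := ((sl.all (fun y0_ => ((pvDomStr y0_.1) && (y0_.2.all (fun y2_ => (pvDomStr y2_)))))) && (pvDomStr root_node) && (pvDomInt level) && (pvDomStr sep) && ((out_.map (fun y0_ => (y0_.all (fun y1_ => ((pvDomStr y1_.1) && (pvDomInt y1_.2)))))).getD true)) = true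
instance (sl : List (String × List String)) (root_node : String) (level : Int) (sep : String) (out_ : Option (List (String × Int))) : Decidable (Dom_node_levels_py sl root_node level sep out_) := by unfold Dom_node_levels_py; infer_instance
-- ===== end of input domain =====

-- B replaces A's recursive DFS by an explicit-stack iterative DFS (same visit order, same cost);
-- like A, the Python B mutates sl and out in place — the equivalence proved here is about the return value.

-- ===== PORT A =====
-- A's recursion threads the mutated dict and out list through as state: (sl, out) in, (sl, out) out.
-- The recursion terminates because every call pops its node from sl before recursing, so the
-- nesting depth is at most sl.length; the wrapper passes fuel sl.length + 1, which is never
-- exhausted on any input (the fuel-0 branch is a totality guard only, not an algorithm switch).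
mutual
def nlA_rec (fuel : Nat) (sl : PySem.Dict String (List String)) (node : String) (level : Int)
    (out : List (String × Int)) : PySem.Dict String (List String) × List (String × Int) :=
  match fuel with
  | 0 => (sl, out)
  | f + 1 =>
    match PySem.Dict.pop? sl node with
    | none => (sl, out)  -- Python raises KeyError here; excluded by Pre_
    | some (succ, sl') => nlA_for f sl' succ level (out ++ [(node, level)])
termination_by (fuel, 0)

-- the 'for sn in successors' loop of A
def nlA_for (fuel : Nat) (sl : PySem.Dict String (List String)) (succ : List String) (level : Int)
    (out : List (String × Int)) : PySem.Dict String (List String) × List (String × Int) :=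
  match succ with
  | [] => (sl, out)
  | sn :: rest =>
    if PySem.Dict.contains sl sn then
      match nlA_rec fuel sl sn (level + 1) out with
      | (sl', out') => nlA_for fuel sl' rest level out'
    else
      nlA_for fuel sl rest level (out ++ [(sn, level + 1)])
termination_by (fuel, succ.length + 1)
end

def node_levels_py (sl : List (String × List String)) (root_node : String) (level : Int)
    (sep : String) (out_ : Option (List (String × Int))) : List (String × Int) :=
  (nlA_rec (sl.length + 1) (PySem.Dict.mk sl) root_node level (out_.getD [])).2

-- ===== PORT B =====
-- popping a successful pop? shrinks the dict (used by nlB_loop's termination)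
theorem pop?_items_length_lt {κ ν : Type} [BEq κ] (d : PySem.Dict κ ν) (k : κ)
    (v : ν) (d' : PySem.Dict κ ν) (h : PySem.Dict.pop? d k = some (v, d')) :
    d'.items.length < d.items.length := by
  unfold PySem.Dict.pop? at h
  cases hg : PySem.Dict.get? d k with
  | none => simp [hg] at h
  | some w =>
    simp [hg] at h
    unfold PySem.Dict.get? at hg
    cases hf : List.find? (fun p => p.1 == k) d.items with
    | none => simp [hf] at hg
    | some pr =>
      have hpr := List.find?_some hf
      have hmem : pr ∈ d.items := List.mem_of_find?_eq_some hf
      rw [← h.2]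
      unfold PySem.Dict.erase
      refine List.length_filter_lt_length_iff_exists.mpr ⟨pr, hmem, ?_⟩
      simp_all
-- B: the Python while-loop over an explicit stack.  The Python stack is a list popped from the
-- end, extended with reversed(children); here the stack is the same list written head-as-top,
-- so 'extend(reversed(children)); pop()' is 'children.map … ++ rest' with the head popped next.
def nlB_loop (sl : PySem.Dict String (List String)) (stack : List (String × Int))
    (out : List (String × Int)) : List (String × Int) :=
  match stack with
  | [] => out
  | (n, l) :: rest =>
    match h : PySem.Dict.pop? sl n with   -- 'if node in sl: children = sl.pop(node)'
    | some (children, sl') =>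
      nlB_loop sl' (children.map (fun sn => (sn, l + 1)) ++ rest) (out ++ [(n, l)])
    | none =>
      nlB_loop sl rest (out ++ [(n, l)])
termination_by (sl.items.length, stack.length)
decreasing_by
  · exact Prod.Lex.left _ _ (pop?_items_length_lt sl n children sl' h)
  · exact Prod.Lex.right _ (by simp)

def node_levels_py_alt (sl : List (String × List String)) (root_node : String) (level : Int)
    (sep : String) (out_ : Option (List (String × Int))) : List (String × Int) :=
  let out0 := out_.getD []
  match PySem.Dict.pop? (PySem.Dict.mk sl) root_node with
  | none => out0   -- Python raises KeyError here; excluded by Pre_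
  | some (succ, sl') =>
    nlB_loop sl' (succ.map (fun sn => (sn, level + 1))) (out0 ++ [(root_node, level)])

-- ===== PRECONDITION & SPEC =====
-- Pre_ excludes (i) inputs whose association list has duplicate keys — such a list does not
-- represent a Python dict (dict(...) collapses duplicates, so neither port can be faithful
-- there) — and (ii) inputs where root_node is not a key of sl, on which both A and B raise
-- KeyError.
def Pre_node_levels_py (sl : List (String × List String)) (root_node : String) (level : Int)
    (sep : String) (out_ : Option (List (String × Int))) : Prop :=
  root_node ∈ sl.map Prod.fst ∧ (sl.map Prod.fst).Nodup
instance (sl : List (String × List String)) (root_node : String) (level : Int) (sep : String) (out_ : Option (List (String × Int))) : Decidable (Pre_node_levels_py sl root_node level sep out_) := by unfold Pre_node_levels_py; infer_instance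

def pvWitness_node_levels_py : (List (String × List String)) × String × Int × String × (Option (List (String × Int))) :=
  ([("a", ["b", "c"]), ("b", ["c"])], "a", 0, "  ", none)

def Spec_node_levels_py (sl : List (String × List String)) (root_node : String) (level : Int) (sep : String) (out_ : Option (List (String × Int))) (out : List (String × Int)) : Prop := out = node_levels_py_alt sl root_node level sep out_
instance (sl : List (String × List String)) (root_node : String) (level : Int) (sep : String) (out_ : Option (List (String × Int))) (out : List (String × Int)) : Decidable (Spec_node_levels_py sl root_node level sep out_ out) := by unfold Spec_node_levels_py; infer_instance

-- ===== CLAIM (what is proved, stated in full; the proofs are below) =====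
def Claim_equal_node_levels_py : Prop := ∀ (sl : List (String × List String)) (root_node : String) (level : Int) (sep : String) (out_ : Option (List (String × Int))), Dom_node_levels_py sl root_node level sep out_ → Pre_node_levels_py sl root_node level sep out_ → Spec_node_levels_py sl root_node level sep out_ (node_levels_py sl root_node level sep out_)

-- ===== LEMMAS AND PROOFS =====

-- A's state-threaded recursion never grows the dict
theorem nlA_mono (f : Nat) :
    (∀ sl n l out, ((nlA_rec f sl n l out).1.items.length ≤ sl.items.length)) ∧
    (∀ sl succ l out, ((nlA_for f sl succ l out).1.items.length ≤ sl.items.length)) := by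
  induction f with
  | zero =>
    have hrec : ∀ sl n l out, ((nlA_rec 0 sl n l out).1.items.length ≤ sl.items.length) := by
      intro sl n l out; simp [nlA_rec]
    refine ⟨hrec, ?_⟩
    intro sl succ l out
    induction succ generalizing sl out with
    | nil => simp [nlA_for]
    | cons sn rest ih =>
      rw [nlA_for]
      split
      · exact le_trans (ih _ _) (hrec sl sn (l + 1) out)
      · exact ih sl _
  | succ f ihf =>
    have hrec : ∀ sl n l out, ((nlA_rec (f + 1) sl n l out).1.items.length ≤ sl.items.length) := by
      intro sl n l out
      rw [nlA_rec]
      cases h : PySem.Dict.pop? sl n with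
      | none => simp
      | some r =>
        obtain ⟨v, sl'⟩ := r
        simp only
        exact le_trans (ihf.2 sl' v l (out ++ [(n, l)]))
          (Nat.le_of_lt (pop?_items_length_lt sl n v sl' h))
    refine ⟨hrec, ?_⟩
    intro sl succ l out
    induction succ generalizing sl out with
    | nil => simp [nlA_for]
    | cons sn rest ih =>
      rw [nlA_for]
      split
      · exact le_trans (ih _ _) (hrec sl sn (l + 1) out)
      · exact ih sl _

-- the bridge: running B's stack loop on one pending node / one pending successor block equals
-- running A's recursion (or its for-loop) first and then B's loop on the rest of the stack
theorem bridge : ∀ k : Nat, ∀ sl : PySem.Dict String (List String), sl.items.length ≤ k →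
    ∀ f : Nat, sl.items.length + 1 ≤ f →
    (∀ n l out rest, (PySem.Dict.pop? sl n).isSome →
      nlB_loop sl ((n, l) :: rest) out
        = nlB_loop (nlA_rec f sl n l out).1 rest (nlA_rec f sl n l out).2) ∧
    (∀ succ l out rest,
      nlB_loop sl (succ.map (fun sn => (sn, l + 1)) ++ rest) out
        = nlB_loop (nlA_for f sl succ l out).1 rest (nlA_for f sl succ l out).2) := by
  intro k
  induction k with
  | zero =>
    intro sl hk f hf
    -- sl has no items: pop? is always none, A's for-loop only appends leaves
    have hempty : sl.items = [] := List.length_eq_zero_iff.mp (Nat.le_zero.mp hk)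
    have hpop : ∀ n : String, PySem.Dict.pop? sl n = none := by
      intro n
      unfold PySem.Dict.pop? PySem.Dict.get?
      simp [hempty]
    constructor
    · intro n l out rest hs
      rw [hpop n] at hs; simp at hs
    · intro succ l out rest
      induction succ generalizing out with
      | nil => simp [nlA_for]
      | cons sn tail ih =>
        have hc : PySem.Dict.contains sl sn = false := by
          unfold PySem.Dict.contains; simp [hempty]
        rw [nlA_for, hc]
        simp only [Bool.false_eq_true, if_false, List.map_cons, List.cons_append]
        rw [nlB_loop, hpop sn]
        exact ih _
  | succ k ihk =>
    intro sl hk f hf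
    have hrec : ∀ sl : PySem.Dict String (List String), sl.items.length ≤ k + 1 →
        ∀ f : Nat, sl.items.length + 1 ≤ f →
        ∀ n l out rest, (PySem.Dict.pop? sl n).isSome →
        nlB_loop sl ((n, l) :: rest) out
          = nlB_loop (nlA_rec f sl n l out).1 rest (nlA_rec f sl n l out).2 := by
      intro sl hk f hf n l out rest hs
      obtain ⟨⟨succ, sl'⟩, hpop⟩ := Option.isSome_iff_exists.mp hs
      obtain ⟨g, rfl⟩ : ∃ g, f = g + 1 := ⟨f - 1, by omega⟩
      have hlt : sl'.items.length < sl.items.length := pop?_items_length_lt sl n succ sl' hpop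
      rw [nlB_loop, hpop, nlA_rec, hpop]
      simp only
      exact (ihk sl' (by omega) g (by omega)).2 succ l (out ++ [(n, l)]) rest
    refine ⟨hrec sl hk f hf, ?_⟩
    intro succ l out rest
    induction succ generalizing sl out with
    | nil => simp [nlA_for]
    | cons sn tail ih =>
      rw [nlA_for]
      cases hc : PySem.Dict.contains sl sn with
      | true =>
        rw [PySem.Dict.contains_eq_isSome_get?] at hc
        obtain ⟨v, hg⟩ := Option.isSome_iff_exists.mp hc
        have hs : (PySem.Dict.pop? sl sn).isSome := by
          unfold PySem.Dict.pop?; rw [hg]; simp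
        simp only [if_true, List.map_cons, List.cons_append]
        rw [hrec sl hk f hf sn (l + 1) out (tail.map (fun sn => (sn, l + 1)) ++ rest) hs]
        have hmono := (nlA_mono f).1 sl sn (l + 1) out
        cases hr : nlA_rec f sl sn (l + 1) out with
        | mk sl'' out'' =>
          rw [hr] at hmono
          have hmono' : sl''.items.length ≤ sl.items.length := by simpa using hmono
          simp only
          exact ih sl'' (by omega) (by omega) out''
      | false =>
        rw [PySem.Dict.contains_eq_isSome_get?] at hc
        have hg : PySem.Dict.get? sl sn = none := Option.not_isSome_iff_eq_none.mp (by simp [hc])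
        have hpop : PySem.Dict.pop? sl sn = none := by
          simp [PySem.Dict.pop?, hg]
        simp only [Bool.false_eq_true, if_false, List.map_cons, List.cons_append]
        rw [nlB_loop, hpop]
        exact ih sl hk hf _

-- ===== VERDICT (by name: the statement is the Claim_ definition above) =====
theorem node_levels_py_spec : Claim_equal_node_levels_py := by
  intro sl root_node level sep out_ _ hpre
  obtain ⟨hmem, _⟩ := hpre
  unfold Spec_node_levels_py node_levels_py node_levels_py_alt
  have hs : (PySem.Dict.pop? (PySem.Dict.mk sl) root_node).isSome := by
    unfold PySem.Dict.pop?
    have hc : PySem.Dict.contains (PySem.Dict.mk sl) root_node = true := by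
      rw [PySem.Dict.contains_iff_mem_keys]; simpa [PySem.Dict.keys] using hmem
    rw [PySem.Dict.contains_eq_isSome_get?] at hc
    obtain ⟨v, hg⟩ := Option.isSome_iff_exists.mp hc
    simp [hg]
  obtain ⟨⟨succ, sl'⟩, hpop⟩ := Option.isSome_iff_exists.mp hs
  have hlen : (PySem.Dict.mk sl).items.length = sl.length := rfl
  have hlt : sl'.items.length < sl.length := by
    have := pop?_items_length_lt (PySem.Dict.mk sl) root_node succ sl' hpop
    omega
  rw [nlA_rec, hpop]
  simp only
  have hb := (bridge sl'.items.length sl' le_rfl sl.length (by omega)).2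
    succ level ((out_.getD []) ++ [(root_node, level)]) []
  rw [List.append_nil] at hb
  rw [hb, nlB_loop]
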